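-- pv_equiv track=rewrite | github.com/witt3rd/pipy | tui/src/pipy_tui/autocomplete.py | _extract_at_prefix
-- ===== SOURCE A (Python) =====
-- def _extract_at_prefix(text: str) -> str | None:
--     """Extract @... prefix from text."""
--     # Find the last @ that starts a token
--     delimiters = set(" \t\"'=")
--
--     for i in range(len(text) - 1, -1, -1):
--         if text[i] == "@":
--             # Check if it's at token start
--             if i == 0 or text[i - 1] in delimiters:
--                 return text[i:]
--         elif text[i] in delimiters and i < len(text) - 1:
--             # We passed a delimiter without finding @
--             break
--
--     return None
-- ===== SOURCE B (Python) =====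
-- def _extract_at_prefix(text: str) -> str | None:
--     """Extract @... prefix from text (two-phase: boundary scan, then prefix check)."""
--     delimiters = " \t\"'="
--     # Phase 1: start of the trailing token = index after the last delimiter
--     # occurring strictly before the final character.
--     start = 0
--     for i, ch in enumerate(text[:-1]):
--         if ch in delimiters:
--             start = i + 1
--     # Phase 2: the trailing token is an @-token or there is none.
--     if start < len(text) and text[start] == "@":
--         return text[start:]
--     return None
-- ===== Notes on version B (the rewrite author's own statement) =====
-- stated objective: simpler
-- what changed: Replaces the backward scan that interleaves @-detection with delimiter-break by two phases: a forward enumerate pass computing the token start (index after the last delimiter strictly before the final character) followed by a single prefix check.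
import Mathlib
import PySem

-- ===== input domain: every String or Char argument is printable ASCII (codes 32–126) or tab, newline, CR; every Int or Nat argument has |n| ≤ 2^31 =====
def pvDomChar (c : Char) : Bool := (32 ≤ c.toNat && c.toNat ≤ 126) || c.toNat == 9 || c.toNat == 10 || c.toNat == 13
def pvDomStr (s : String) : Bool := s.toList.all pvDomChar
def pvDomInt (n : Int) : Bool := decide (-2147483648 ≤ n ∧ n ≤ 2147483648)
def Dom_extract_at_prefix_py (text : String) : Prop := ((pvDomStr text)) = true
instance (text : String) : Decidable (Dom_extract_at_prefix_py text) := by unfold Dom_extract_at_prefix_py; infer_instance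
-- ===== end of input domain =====

-- B replaces A's backward scan (interleaving @-detection and delimiter-break) by a forward
-- boundary-computation pass followed by a single prefix check; objective: simpler decomposition.


-- shared helper: membership in the delimiter set " \t\"'="
def pvDelim (c : Char) : Bool := c = ' ' || c = '\t' || c = '"' || c = '\'' || c = '='

-- ===== PORT A =====
-- the backward loop 'for i in range(len(text)-1, -1, -1)'; aLoopA cs (i+1) processes index i
def aLoopA (cs : List Char) : Nat → Option String
  | 0 => none
  | i + 1 =>
    if cs.getD i ' ' = '@' then
      if i = 0 ∨ pvDelim (cs.getD (i - 1) ' ') then some (String.ofList (cs.drop i))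
      else aLoopA cs i
    else if pvDelim (cs.getD i ' ') ∧ i < cs.length - 1 then none
    else aLoopA cs i

def extract_at_prefix_py (text : String) : Option String :=
  aLoopA text.toList text.toList.length

-- ===== PORT B =====
-- phase 1: 'for i, ch in enumerate(text[:-1]): if ch in delimiters: start = i + 1'; phase 2: prefix check
def extract_at_prefix_py_alt (text : String) : Option String :=
  let cs := text.toList
  let start := (PySem.List.enumerate cs.dropLast 0).foldl
    (fun st p => if pvDelim p.2 then p.1 + 1 else st) 0
  if start < (cs.length : Int) ∧ cs.getD start.toNat ' ' = '@' then
    some (String.ofList (cs.drop start.toNat))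
  else none

-- ===== PRECONDITION & SPEC =====
def Spec_extract_at_prefix_py (text : String) (out : Option String) : Prop := out = extract_at_prefix_py_alt text
instance (text : String) (out : Option String) : Decidable (Spec_extract_at_prefix_py text out) := by unfold Spec_extract_at_prefix_py; infer_instance

-- ===== CLAIM (what is proved, stated in full; the proofs are below) =====
def Claim_equal_extract_at_prefix_py : Prop := ∀ (text : String), Dom_extract_at_prefix_py text → Spec_extract_at_prefix_py text (extract_at_prefix_py text)

-- ===== LEMMAS AND PROOFS =====

-- boundary after scanning the first m characters: index after the last delimiter among cs[0..m)
def pvBnd (cs : List Char) (m : Nat) : Nat :=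
  (List.range m).foldl (fun st j => if pvDelim (cs.getD j ' ') then j + 1 else st) 0

-- structural front-to-back form of the same boundary scan, used to bridge to B's enumerate fold
def pvBndList : List Char → Nat → Nat → Nat
  | [], _, acc => acc
  | c :: rest, i, acc => pvBndList rest (i + 1) (if pvDelim c then i + 1 else acc)

theorem pvBnd_succ (cs : List Char) (m : Nat) :
    pvBnd cs (m + 1) = if pvDelim (cs.getD m ' ') then m + 1 else pvBnd cs m := by
  simp [pvBnd, List.range_succ]

theorem pvBnd_le (cs : List Char) (m : Nat) : pvBnd cs m ≤ m := by
  induction m with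
  | zero => simp [pvBnd]
  | succ m ih => rw [pvBnd_succ]; split_ifs <;> omega

theorem pvBnd_pos_delim (cs : List Char) (m : Nat) (h : 0 < pvBnd cs m) :
    pvDelim (cs.getD (pvBnd cs m - 1) ' ') = true := by
  induction m with
  | zero => simp [pvBnd] at h
  | succ m ih =>
    rw [pvBnd_succ] at h ⊢
    split_ifs at h ⊢ with hd
    · simpa using hd
    · exact ih h

theorem pvBndList_append (l1 l2 : List Char) (i acc : Nat) :
    pvBndList (l1 ++ l2) i acc = pvBndList l2 (i + l1.length) (pvBndList l1 i acc) := by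
  induction l1 generalizing i acc with
  | nil => simp [pvBndList]
  | cons c rest ih =>
    simp only [List.cons_append, pvBndList, ih, List.length_cons]
    ring_nf

theorem pvBndList_take (cs : List Char) (m : Nat) (hm : m ≤ cs.length) :
    pvBndList (cs.take m) 0 0 = pvBnd cs m := by
  induction m with
  | zero => simp [pvBndList, pvBnd]
  | succ m ih =>
    have hm' : m < cs.length := hm
    have htake : cs.take (m + 1) = cs.take m ++ [cs.getD m ' '] := by
      rw [List.take_add_one]
      simp [List.getD, hm']
    rw [htake, pvBndList_append, ih (le_of_lt hm'), pvBnd_succ]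
    simp [pvBndList, List.length_take, Nat.min_eq_left (le_of_lt hm')]

-- B's enumerate fold is pvBndList, cast to Int
theorem pvEnumFold (l : List Char) : ∀ (k acc : Nat),
    (PySem.List.enumerate l (k : Int)).foldl
        (fun st p => if pvDelim p.2 then p.1 + 1 else st) (acc : Int)
      = ((pvBndList l k acc : Nat) : Int) := by
  induction l with
  | nil => intro k acc; simp [PySem.List.enumerate_nil, pvBndList]
  | cons c rest ih =>
    intro k acc
    rw [PySem.List.enumerate_cons, List.foldl_cons]
    simp only [pvBndList]
    by_cases hd : pvDelim c
    · simpa [hd] using ih (k + 1) (k + 1)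
    · simpa [hd] using ih (k + 1) acc

-- characterization of A's backward loop by the boundary pvBnd
theorem aLoopA_char (cs : List Char) : ∀ (i : Nat), i ≤ cs.length →
    aLoopA cs i =
      if pvBnd cs (min i (cs.length - 1)) < i ∧
          cs.getD (pvBnd cs (min i (cs.length - 1))) ' ' = '@' then
        some (String.ofList (cs.drop (pvBnd cs (min i (cs.length - 1)))))
      else none := by
  intro i
  induction i with
  | zero => intro _; simp [aLoopA, pvBnd]
  | succ i ih =>
    intro hi
    have hin : i < cs.length := hi
    have hDat : ¬ pvDelim '@' := by decide
    rw [aLoopA]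
    by_cases hAt : cs.getD i ' ' = '@'
    · rw [if_pos hAt]
      by_cases hTok : i = 0 ∨ pvDelim (cs.getD (i - 1) ' ')
      · -- returns some (drop i); show the boundary is exactly i
        rw [if_pos hTok]
        have hb : pvBnd cs (min (i + 1) (cs.length - 1)) = i := by
          rcases hTok with h0 | hdprev
          · subst h0
            rcases Nat.eq_zero_or_pos (cs.length - 1) with h | h
            · simp [h, pvBnd]
            · rw [Nat.min_eq_left h]
              show pvBnd cs (0 + 1) = 0
              rw [pvBnd_succ, hAt]
              simp [pvDelim, pvBnd]
          · have hi1 : 1 ≤ i := by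
              rcases Nat.eq_zero_or_pos i with h | h
              · exfalso
                rw [h] at hdprev hAt
                rw [show (0 : Nat) - 1 = 0 from rfl, hAt] at hdprev
                exact hDat hdprev
              · exact h
            have hbI : pvBnd cs i = i := by
              rw [show i = (i - 1) + 1 by omega, pvBnd_succ, if_pos hdprev]
            rcases Nat.lt_or_ge (i + 1) (cs.length - 1) with h | h
            · rw [Nat.min_eq_left (le_of_lt h), pvBnd_succ, hAt]
              simp [pvDelim, hbI]
            · have : cs.length - 1 = i ∨ cs.length - 1 = i + 1 := by omega
              rcases this with h' | h'
              · rw [h', Nat.min_eq_right (by omega), hbI]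
              · rw [h', Nat.min_self, pvBnd_succ, hAt]
                simp [pvDelim, hbI]
        rw [hb, if_pos ⟨Nat.lt_succ_self i, hAt⟩]
      · -- '@' not at token start: recurse; boundaries agree and never equal i
        rw [if_neg hTok]
        rw [not_or] at hTok
        obtain ⟨hi0, hdprev⟩ := hTok
        have hbeq : pvBnd cs (min (i + 1) (cs.length - 1)) = pvBnd cs (min i (cs.length - 1)) := by
          rcases Nat.lt_or_ge i (cs.length - 1) with h | h
          · rw [Nat.min_eq_left h, Nat.min_eq_left (le_of_lt h), pvBnd_succ, hAt]
            simp [pvDelim]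
          · rw [Nat.min_eq_right h, Nat.min_eq_right (by omega)]
        have hsne : pvBnd cs (min i (cs.length - 1)) ≠ i := by
          intro hs
          have hpos : 0 < pvBnd cs (min i (cs.length - 1)) := by omega
          have := pvBnd_pos_delim cs (min i (cs.length - 1)) hpos
          rw [hs] at this
          exact hdprev this
        have hsle : pvBnd cs (min i (cs.length - 1)) ≤ i :=
          le_trans (pvBnd_le _ _) (Nat.min_le_left _ _)
        rw [ih (le_of_lt hin), hbeq]
        congr 1
        · -- condition: s < i+1 ∧ … ↔ s < i ∧ …
          have : (pvBnd cs (min i (cs.length - 1)) < i + 1) = (pvBnd cs (min i (cs.length - 1)) < i) := by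
            simp only [eq_iff_iff]; omega
          simp only [this]
    · rw [if_neg hAt]
      by_cases hBr : pvDelim (cs.getD i ' ') ∧ i < cs.length - 1
      · -- break: boundary becomes i+1, condition i+1 < i+1 fails
        rw [if_pos hBr]
        have hb : pvBnd cs (min (i + 1) (cs.length - 1)) = i + 1 := by
          rw [Nat.min_eq_left hBr.2, pvBnd_succ, if_pos hBr.1]
        rw [hb]
        simp
      · -- fall through: recurse; boundaries agree; cs[i] ≠ '@' excludes s = i
        rw [if_neg hBr]
        have hbeq : pvBnd cs (min (i + 1) (cs.length - 1)) = pvBnd cs (min i (cs.length - 1)) := by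
          rcases Nat.lt_or_ge i (cs.length - 1) with h | h
          · have hnd : ¬ pvDelim (cs.getD i ' ') := fun hd => hBr ⟨hd, h⟩
            rw [Nat.min_eq_left h, Nat.min_eq_left (le_of_lt h), pvBnd_succ, if_neg hnd]
          · rw [Nat.min_eq_right h, Nat.min_eq_right (by omega)]
        have hsle : pvBnd cs (min i (cs.length - 1)) ≤ i :=
          le_trans (pvBnd_le _ _) (Nat.min_le_left _ _)
        rw [ih (le_of_lt hin), hbeq]
        by_cases hsi : pvBnd cs (min i (cs.length - 1)) = i
        · rw [hsi]
          simp only [List.getD] at hAt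
          simp [hAt]
        · have : (pvBnd cs (min i (cs.length - 1)) < i + 1) = (pvBnd cs (min i (cs.length - 1)) < i) := by
            simp only [eq_iff_iff]; omega
          simp only [this]

-- ===== VERDICT (by name: the statement is the Claim_ definition above) =====
theorem extract_at_prefix_py_spec : Claim_equal_extract_at_prefix_py := by
  intro text _
  unfold Spec_extract_at_prefix_py extract_at_prefix_py extract_at_prefix_py_alt
  set cs := text.toList with hcs
  have hstart : (PySem.List.enumerate cs.dropLast 0).foldl
      (fun st p => if pvDelim p.2 then p.1 + 1 else st) 0
      = ((pvBnd cs (cs.length - 1) : Nat) : Int) := by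
    have h0 := pvEnumFold cs.dropLast 0 0
    simp only [Nat.cast_zero] at h0
    rw [h0]
    congr 1
    have : cs.dropLast = cs.take (cs.length - 1) := by
      simp [List.dropLast_eq_take]
    rw [this, pvBndList_take cs (cs.length - 1) (Nat.sub_le _ _)]
  rw [aLoopA_char cs cs.length (le_refl _)]
  simp only [hstart]
  rcases Nat.eq_zero_or_pos cs.length with h0 | hpos
  · simp [h0, pvBnd]
  · have hmin : min cs.length (cs.length - 1) = cs.length - 1 := Nat.min_eq_right (Nat.sub_le _ _)
    rw [hmin]
    have hlt : pvBnd cs (cs.length - 1) < cs.length :=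
      lt_of_le_of_lt (pvBnd_le _ _) (by omega)
    have htoNat : ((pvBnd cs (cs.length - 1) : Nat) : Int).toNat = pvBnd cs (cs.length - 1) := by simp
    rw [htoNat]
    have hcast : (((pvBnd cs (cs.length - 1) : Nat) : Int) < (cs.length : Int)) = True := by
      simp only [eq_iff_iff, iff_true]
      exact_mod_cast hlt
    simp only [hcast, true_and]
    have : (pvBnd cs (cs.length - 1) < cs.length ∧ cs.getD (pvBnd cs (cs.length - 1)) ' ' = '@')
        = (cs.getD (pvBnd cs (cs.length - 1)) ' ' = '@') := by
      simp only [eq_iff_iff]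
      exact ⟨fun h => h.2, fun h => ⟨hlt, h⟩⟩
    simp only [this]
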